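-- pv_equiv track=rewrite | github.com/Codeguruu03/CyberSuite | cupp.py | generate_wordlist
-- ===== SOURCE A (Python) =====
-- def generate_wordlist(names, keywords, years, separators):
--     wordlist = []
--
--     for name in names:
--         for keyword in keywords:
--             for year in years:
--                 for separator in separators:
--                     # Generate combinations of name, keyword, year, and separator
--                     combination = [name, keyword, year, separator]
--                     wordlist.append(''.join(combination))
--
--     return wordlist
--
-- names = ['john', 'emma']
--
-- keywords = ['password', '123', 'admin']
--
-- years = ['1990', '1995']
--
-- separators = ['', '_', '-']
--
-- wordlist = generate_wordlist(names, keywords, years, separators)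
-- ===== SOURCE B (Python) =====
-- def generate_wordlist(names, keywords, years, separators):
--     acc = ['']
--     for dim in [names, keywords, years, separators]:
--         acc = [prefix + item for prefix in acc for item in dim]
--     return acc
-- ===== Notes on version B (the rewrite author's own statement) =====
-- stated objective: simpler
-- what changed: Replaces the four nested loops with a single fold over the list of the four dimensions, extending an accumulator of partial concatenations one axis at a time.
import Mathlib
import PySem

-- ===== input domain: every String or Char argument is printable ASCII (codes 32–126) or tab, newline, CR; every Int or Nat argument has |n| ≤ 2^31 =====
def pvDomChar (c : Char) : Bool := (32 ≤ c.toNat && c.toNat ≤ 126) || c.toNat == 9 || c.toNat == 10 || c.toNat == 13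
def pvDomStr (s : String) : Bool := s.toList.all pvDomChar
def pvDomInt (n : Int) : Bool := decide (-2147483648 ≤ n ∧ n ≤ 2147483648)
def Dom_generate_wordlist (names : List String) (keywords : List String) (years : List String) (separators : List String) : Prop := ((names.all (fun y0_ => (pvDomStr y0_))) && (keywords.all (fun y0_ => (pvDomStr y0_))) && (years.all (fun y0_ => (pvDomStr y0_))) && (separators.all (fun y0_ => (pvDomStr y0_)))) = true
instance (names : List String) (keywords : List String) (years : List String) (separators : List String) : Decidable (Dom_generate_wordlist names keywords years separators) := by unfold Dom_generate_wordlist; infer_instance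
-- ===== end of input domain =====

-- B replaces A's four nested appending loops with one fold over the list of dimensions (objective: simpler).

-- ===== PORT A =====
-- A: four nested loops appending name++keyword++year++separator
def generate_wordlist (names : List String) (keywords : List String) (years : List String) (separators : List String) : List String :=
  names.foldl (fun wl name =>
    keywords.foldl (fun wl keyword =>
      years.foldl (fun wl year =>
        separators.foldl (fun wl separator =>
          wl ++ [name ++ keyword ++ year ++ separator]) wl) wl) wl) []

-- ===== PORT B =====
-- B: fold over the list of the four dimensions, extending an accumulator of partial concatenations one axis at a time
def generate_wordlist_alt (names : List String) (keywords : List String) (years : List String) (separators : List String) : List String :=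
  [names, keywords, years, separators].foldl
    (fun acc dim => acc.flatMap (fun pfx => dim.map (fun item => pfx ++ item))) [""]

-- ===== PRECONDITION & SPEC =====
def Spec_generate_wordlist (names : List String) (keywords : List String) (years : List String) (separators : List String) (out : List String) : Prop := out = generate_wordlist_alt names keywords years separators
instance (names : List String) (keywords : List String) (years : List String) (separators : List String) (out : List String) : Decidable (Spec_generate_wordlist names keywords years separators out) := by unfold Spec_generate_wordlist; infer_instance

-- ===== CLAIM (what is proved, stated in full; the proofs are below) =====
def Claim_equal_generate_wordlist : Prop := ∀ (names : List String) (keywords : List String) (years : List String) (separators : List String), Dom_generate_wordlist names keywords years separators → Spec_generate_wordlist names keywords years separators (generate_wordlist names keywords years separators)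

-- ===== LEMMAS AND PROOFS =====
theorem pvL1 (p : String) (ss : List String) :
    (ss.map (fun s => [p ++ s])).flatten = ss.map (fun s => p ++ s) := by
  induction ss with
  | nil => simp
  | cons s t ih => simp [ih]

theorem pvL2 (p : String) (ys ss : List String) :
    (ys.map (fun y => (ss.map (fun s => [p ++ (y ++ s)])).flatten)).flatten
      = List.flatMap (fun pfx => ss.map (fun s => pfx ++ s)) (ys.map (fun y => p ++ y)) := by
  induction ys with
  | nil => simp
  | cons y t ih =>
    simp [ih, List.flatMap_cons]
    have := pvL1 (p ++ y) ss
    simpa [String.append_assoc] using this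

theorem pvL3 (p : String) (ks ys ss : List String) :
    (ks.map (fun k => (ys.map (fun y => (ss.map (fun s => [p ++ (k ++ (y ++ s))])).flatten)).flatten)).flatten
      = List.flatMap (fun pfx => ss.map (fun s => pfx ++ s))
          (List.flatMap (fun pfx => ys.map (fun y => pfx ++ y)) (ks.map (fun k => p ++ k))) := by
  induction ks with
  | nil => simp
  | cons k t ih =>
    simp [ih, List.flatMap_cons]
    have := pvL2 (p ++ k) ys ss
    simpa [String.append_assoc] using this

-- ===== VERDICT (by name: the statement is the Claim_ definition above) =====
theorem generate_wordlist_spec : Claim_equal_generate_wordlist := by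
  intro names keywords years separators hd
  clear hd
  unfold Spec_generate_wordlist generate_wordlist generate_wordlist_alt
  simp [String.append_assoc]
  induction names with
  | nil => simp
  | cons n ns ih =>
    simp [ih, List.flatMap_cons]
    have := pvL3 n keywords years separators
    simpa using this
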